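-- pv_equiv track=rewrite | github.com/virtgen/opptimizer | opptimizer/opp.py | opplisttopairs
-- ===== SOURCE A (Python) =====
-- def opplistvals(listval):
--     result = []
--     if listval != None and listval != '':
--         vals = listval.split(',')
--         for val in vals:
--             result.append(val)
--     return result
--
-- def opplisttopairs(params):
--     result = []
--     list = opplistvals(params)
--     list_len = len(list) if list else 0
--     if list_len > 0:
--         first_elem_ind = 0
--         while first_elem_ind < list_len:
--             first_elem = list[first_elem_ind]
--             second_elem = list[first_elem_ind + 1] if first_elem_ind + 1 < list_len else None
--             result.append((first_elem, second_elem))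
--             first_elem_ind += 2
--
--     return result
-- ===== SOURCE B (Python) =====
-- def _pairs(vals):
--     if not vals:
--         return []
--     if len(vals) == 1:
--         return [(vals[0], None)]
--     return [(vals[0], vals[1])] + _pairs(vals[2:])
--
-- def opplisttopairs(params):
--     if params is None or params == '':
--         return []
--     return _pairs(params.split(','))
-- ===== Notes on version B (the rewrite author's own statement) =====
-- stated objective: simpler
-- what changed: Replaces the copy loop plus index-stepping while loop with a direct split and a structural recursion that consumes the list two elements at a time.
import Mathlib
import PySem

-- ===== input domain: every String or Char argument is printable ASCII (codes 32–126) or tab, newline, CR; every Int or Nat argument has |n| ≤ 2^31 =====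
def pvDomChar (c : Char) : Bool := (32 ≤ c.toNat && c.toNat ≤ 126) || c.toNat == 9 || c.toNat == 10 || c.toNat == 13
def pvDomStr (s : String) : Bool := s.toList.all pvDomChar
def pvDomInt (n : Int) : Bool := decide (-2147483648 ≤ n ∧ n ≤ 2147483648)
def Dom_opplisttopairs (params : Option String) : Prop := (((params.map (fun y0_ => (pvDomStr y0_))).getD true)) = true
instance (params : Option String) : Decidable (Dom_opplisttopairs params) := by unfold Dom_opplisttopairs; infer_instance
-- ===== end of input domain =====

-- B replaces the copy loop and index-stepping while loop with a direct split and a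
-- structural two-at-a-time recursion (objective: simpler).

-- ===== PORT A =====
def opplistvals (listval : Option String) : List String :=
  let result : List String := []
  if listval ≠ none ∧ listval ≠ some "" then
    let vals := (PySem.Str.split? (listval.getD "") ",").getD []
    vals.foldl (fun r v => r ++ [v]) result
  else result

def opplisttopairsLoop (l : List String) (listLen : Nat) (i : Nat)
    (result : List (String × Option String)) : List (String × Option String) :=
  if i < listLen then
    let first := PySem.List.pyGetD l (i : Int) ""
    let second := if i + 1 < listLen then some (PySem.List.pyGetD l ((i : Int) + 1) "") else none
    opplisttopairsLoop l listLen (i + 2) (result ++ [(first, second)])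
  else result
termination_by listLen - i

def opplisttopairs (params : Option String) : List (String × Option String) :=
  let result : List (String × Option String) := []
  let l := opplistvals params
  let listLen := if l ≠ [] then l.length else 0
  if listLen > 0 then opplisttopairsLoop l listLen 0 result else result

-- ===== PORT B =====
def pairsB : List String → List (String × Option String)
  | [] => []
  | [x] => [(x, none)]
  | x :: y :: rest => [(x, some y)] ++ pairsB rest

def opplisttopairs_alt (params : Option String) : List (String × Option String) :=
  match params with
  | none => []
  | some s => if s = "" then [] else pairsB ((PySem.Str.split? s ",").getD [])

-- ===== PRECONDITION & SPEC =====
def Spec_opplisttopairs (params : Option String) (out : List (String × Option String)) : Prop := out = opplisttopairs_alt params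
instance (params : Option String) (out : List (String × Option String)) : Decidable (Spec_opplisttopairs params out) := by unfold Spec_opplisttopairs; infer_instance

-- ===== CLAIM (what is proved, stated in full; the proofs are below) =====
def Claim_equal_opplisttopairs : Prop := ∀ (params : Option String), Dom_opplisttopairs params → Spec_opplisttopairs params (opplisttopairs params)

-- ===== LEMMAS AND PROOFS =====
theorem foldl_append_id (vals acc : List String) :
    vals.foldl (fun r v => r ++ [v]) acc = acc ++ vals := by
  induction vals generalizing acc with
  | nil => simp
  | cons v vs ih => simp [List.foldl, ih]

theorem loop_eq_pairsB (l : List String) (i : Nat) (acc : List (String × Option String)) :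
    opplisttopairsLoop l l.length i acc = acc ++ pairsB (l.drop i) := by
  have H : ∀ (n i : Nat) (acc : List (String × Option String)), l.length - i ≤ n →
      opplisttopairsLoop l l.length i acc = acc ++ pairsB (l.drop i) := by
    intro n
    induction n with
    | zero =>
      intro i acc hle
      rw [opplisttopairsLoop]
      have hni : ¬ i < l.length := by omega
      have hd : List.drop i l = [] := List.drop_eq_nil_of_le (by omega)
      simp [hni, hd, pairsB]
    | succ n ih =>
      intro i acc hle
      rw [opplisttopairsLoop]
      by_cases hi : i < l.length
      · have hx : l[i]? = some l[i] := List.getElem?_eq_getElem hi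
        have hdrop : List.drop i l = l[i] :: List.drop (i + 1) l := List.drop_eq_getElem_cons hi
        by_cases h2 : i + 1 < l.length
        · have hy : l[i + 1]? = some l[i + 1] := List.getElem?_eq_getElem h2
          have hdrop2 : List.drop (i + 1) l = l[i + 1] :: List.drop (i + 2) l :=
            List.drop_eq_getElem_cons h2
          have key : ∀ acc' : List (String × Option String),
              opplisttopairsLoop l l.length (i + 2) acc' = acc' ++ pairsB (l.drop (i + 2)) :=
            fun acc' => ih (i + 2) acc' (by omega)
          simp only [hi, h2, if_pos]
          rw [key, hdrop, hdrop2]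
          have g1 : PySem.List.pyGetD l ((i : Int)) "" = l[i] := by
            rw [PySem.List.pyGetD_natCast]; simp [List.getD, hx]
          have g2 : PySem.List.pyGetD l ((i : Int) + 1) "" = l[i + 1] := by
            have hc : ((i : Int) + 1) = (((i + 1 : Nat)) : Int) := by push_cast; ring
            rw [hc, PySem.List.pyGetD_natCast]; simp [List.getD, hy]
          rw [g1, g2]
          simp [pairsB]
        · have hd2 : List.drop (i + 1) l = [] := List.drop_eq_nil_of_le (by omega)
          have hni2 : ¬ i + 2 < l.length := by omega
          simp only [hi, if_pos, h2, if_false]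
          rw [opplisttopairsLoop]
          have g1 : PySem.List.pyGetD l ((i : Int)) "" = l[i] := by
            rw [PySem.List.pyGetD_natCast]; simp [List.getD, hx]
          simp [hni2, hdrop, hd2, g1, pairsB]
      · have hd : List.drop i l = [] := List.drop_eq_nil_of_le (by omega)
        simp [hi, hd, pairsB]
  exact H l.length i acc (by omega)

-- ===== VERDICT (by name: the statement is the Claim_ definition above) =====
theorem opplisttopairs_spec : Claim_equal_opplisttopairs := by
  intro params _
  unfold Spec_opplisttopairs opplisttopairs opplisttopairs_alt opplistvals
  cases params with
  | none => simp
  | some s =>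
    by_cases hs : s = ""
    · simp [hs]
    · simp only [ne_eq, reduceCtorEq, not_false_iff, Option.some.injEq, hs, and_true,
        if_true, Option.getD_some]
      rw [foldl_append_id]
      set vs := (PySem.Str.split? s ",").getD [] with hvs
      by_cases hne : vs = []
      · simp [hne, pairsB]
      · have hlen : 0 < vs.length := List.length_pos_iff.mpr hne
        simp only [List.nil_append]
        simp [hne, hlen]
        simpa using loop_eq_pairsB vs 0 []
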